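-- pv_equiv track=rewrite | github.com/jeroenvanhattem/lolcode_interpreter | code.py | DIFFRNT
-- ===== SOURCE A (Python) =====
-- def DIFFRNT(code, index):
--     variable_one = 0
--     variable_two = 0
--     variable_different = False
--     variable_one_index = code[index].find("DIFFRINT ") + 9
--     variable_two_index = code[index].find("AN ") + 3
--     for x in range (variable_one_index, len(code[index])):
--             if code[index][x] is not " " and code[index][x] is not ",":
--                 variable_one = variable_one + int(code[index][x])
--             else:
--                 break
--
--     for x in range (variable_two_index, len(code[index])):
--             if code[index][x] is not " " and code[index][x] is not ",":
--                 variable_two = variable_two + int(code[index][x])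
--             else:
--                 break
--
--     variable_different = False if (variable_one == variable_two) else True
--
--     if variable_different:
--         return "WIN"
--     else:
--         return "LOSE"
-- ===== SOURCE B (Python) =====
-- def DIFFRNT(code, index):
--     line = code[index]
--
--     def operand(off):
--         seg = line[off:]
--         i = seg.find(' ')
--         j = seg.find(',')
--         cut = len(seg)
--         if i != -1:
--             cut = i
--         if j != -1:
--             cut = min(cut, j)
--         return sum(int(c) for c in seg[:cut])
--
--     one = operand(line.find("DIFFRINT ") + 9)
--     two = operand(line.find("AN ") + 3)
--     return "WIN" if one != two else "LOSE"
-- ===== Notes on version B (the rewrite author's own statement) =====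
-- stated objective: simpler
-- what changed: Replaces A's two index-driven scan-and-break loops over range(offset, len) with token isolation: slice from the offset, cut at the earliest space/comma found via find, and sum the digits of that token; the WIN/LOSE decision collapses to one comparison.
import Mathlib
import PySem

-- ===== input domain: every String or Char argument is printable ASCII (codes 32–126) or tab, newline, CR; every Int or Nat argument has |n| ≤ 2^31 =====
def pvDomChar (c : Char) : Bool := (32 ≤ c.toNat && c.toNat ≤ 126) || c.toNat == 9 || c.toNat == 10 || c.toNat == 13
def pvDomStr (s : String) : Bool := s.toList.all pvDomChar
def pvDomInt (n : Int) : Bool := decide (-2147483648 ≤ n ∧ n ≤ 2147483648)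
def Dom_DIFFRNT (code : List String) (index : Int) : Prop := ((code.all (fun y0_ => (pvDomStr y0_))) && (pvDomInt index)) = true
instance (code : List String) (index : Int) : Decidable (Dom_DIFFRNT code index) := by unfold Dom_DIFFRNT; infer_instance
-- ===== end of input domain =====

-- B replaces A's two index-driven scan-and-break loops by isolating each operand token
-- (slice from the offset, cut at the earliest space/comma located with find) and summing
-- its digits with a fold; objective: simpler decomposition, same cost.

-- ===== PORT A =====
-- A's for-loop over range(off, len(line)) with break, summing int(line[x]);
-- returns none exactly where Python's int() raises ValueError.
def pvScanA (s : List Char) : List Int → Int → Option Int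
  | [], acc => some acc
  | x :: xs, acc =>
    match PySem.List.pyGet? s x with
    | none => none
    | some c =>
      if c ≠ ' ' ∧ c ≠ ',' then
        match PySem.Int.ofChars? [c] with
        | none => none
        | some v => pvScanA s xs (acc + v)
      else some acc

def DIFFRNT (code : List String) (index : Int) : String :=
  match PySem.List.pyGet? code index with
  | none => ""   -- IndexError: excluded by Pre_
  | some line =>
    let s := line.toList
    let off1 := PySem.Chars.find s ("DIFFRINT ".toList) + 9
    let off2 := PySem.Chars.find s ("AN ".toList) + 3
    match pvScanA s (PySem.List.pyRange off1 (s.length : Int) 1) 0,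
          pvScanA s (PySem.List.pyRange off2 (s.length : Int) 1) 0 with
    | some v1, some v2 =>
      let different := if v1 = v2 then false else true
      if different then "WIN" else "LOSE"
    | _, _ => ""   -- ValueError from int(): excluded by Pre_

-- ===== PORT B =====
-- B's operand(off): seg = line[off:]; cut at the earliest of seg.find(' ') / seg.find(',');
-- sum(int(c) for c in seg[:cut]) as a fold; none exactly where int() raises ValueError.
def pvOperand (line : List Char) (off : Int) : Option Int :=
  let seg := PySem.List.slice line (some off) none
  let i := PySem.Chars.find seg [' ']
  let j := PySem.Chars.find seg [',']
  let cut0 : Int := (seg.length : Int)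
  let cut1 : Int := if i ≠ -1 then i else cut0
  let cut : Int := if j ≠ -1 then min cut1 j else cut1
  (PySem.List.slice seg none (some cut)).foldl
    (fun acc? c => acc?.bind (fun a => (PySem.Int.ofChars? [c]).map (fun v => a + v))) (some 0)

def DIFFRNT_alt (code : List String) (index : Int) : String :=
  -- line = code[index]; an IndexError (none) is excluded by Pre_
  (PySem.List.pyGet? code index).elim "" (fun line =>
    let s := line.toList
    -- a ValueError from int() (none) is excluded by Pre_
    ((pvOperand s (PySem.Chars.find s ("DIFFRINT ".toList) + 9)).bind (fun one =>
      (pvOperand s (PySem.Chars.find s ("AN ".toList) + 3)).map (fun two =>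
        if one ≠ two then "WIN" else "LOSE"))).getD "")

-- ===== PRECONDITION & SPEC =====
-- Pre_ excludes exactly the inputs where Python A raises: an out-of-range index
-- (IndexError) or a non-int character inside either operand token before the first
-- space/comma (ValueError from int()).
def pvToken (s : List Char) (off : Nat) : List Char :=
  (s.drop off).takeWhile (fun c => !(c == ' ' || c == ','))

def pvPreB (code : List String) (index : Int) : Bool :=
  match PySem.List.pyGet? code index with
  | none => false
  | some line =>
    (pvToken line.toList (PySem.Chars.find line.toList ("DIFFRINT ".toList) + 9).toNat).all
        (fun c => (PySem.Int.ofChars? [c]).isSome)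
    && (pvToken line.toList (PySem.Chars.find line.toList ("AN ".toList) + 3).toNat).all
        (fun c => (PySem.Int.ofChars? [c]).isSome)

def Pre_DIFFRNT (code : List String) (index : Int) : Prop := pvPreB code index = true
instance (code : List String) (index : Int) : Decidable (Pre_DIFFRNT code index) := by
  unfold Pre_DIFFRNT; infer_instance

def pvWitness_DIFFRNT : List String × Int := (["BOTH SAEM DIFFRINT 3 AN 41, O RLY?"], 0)

def Spec_DIFFRNT (code : List String) (index : Int) (out : String) : Prop := out = DIFFRNT_alt code index
instance (code : List String) (index : Int) (out : String) : Decidable (Spec_DIFFRNT code index out) := by unfold Spec_DIFFRNT; infer_instance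

-- ===== CLAIM (what is proved, stated in full; the proofs are below) =====
def Claim_equal_DIFFRNT : Prop := ∀ (code : List String) (index : Int), Dom_DIFFRNT code index → Pre_DIFFRNT code index → Spec_DIFFRNT code index (DIFFRNT code index)

-- ===== LEMMAS AND PROOFS =====

-- the direct recursion on the suffix that A's indexed loop performs
def pvScanC : List Char → Int → Option Int
  | [], acc => some acc
  | c :: cs, acc =>
    if c ≠ ' ' ∧ c ≠ ',' then
      match PySem.Int.ofChars? [c] with
      | none => none
      | some v => pvScanC cs (acc + v)
    else some acc

lemma pvScanA_eq_pvScanC (s : List Char) (n : Nat) (acc : Int) :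
    pvScanA s (PySem.List.pyRange (n : Int) (s.length : Int) 1) acc = pvScanC (List.drop n s) acc := by
  induction hk : s.length - n generalizing n acc with
  | zero =>
    have h : s.length ≤ n := by omega
    rw [PySem.List.pyRange_one_eq_nil (by exact_mod_cast h), List.drop_eq_nil_of_le h]
    rfl
  | succ k ih =>
    have h : n < s.length := by omega
    rw [PySem.List.pyRange_one_cons (by exact_mod_cast h)]
    rw [List.drop_eq_getElem_cons h]
    unfold pvScanA pvScanC
    rw [PySem.List.pyGet?_natCast, List.getElem?_eq_getElem h]
    simp only
    split
    · split
      · rfl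
      · have hcast : ((n : Int) + 1) = ((n + 1 : Nat) : Int) := by push_cast; ring
        rw [hcast, ih (n + 1) _ (by omega)]
    · rfl

lemma pvStep_none (l : List Char) :
    l.foldl (fun acc? c => acc?.bind (fun a => (PySem.Int.ofChars? [c]).map (fun v => a + v)))
      none = none := by
  induction l with
  | nil => rfl
  | cons c cs ih => simpa using ih

lemma pvScanC_eq_fold (cs : List Char) (acc : Int) :
    pvScanC cs acc =
      (cs.takeWhile (fun c => !(c == ' ' || c == ','))).foldl
        (fun acc? c => acc?.bind (fun a => (PySem.Int.ofChars? [c]).map (fun v => a + v)))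
        (some acc) := by
  induction cs generalizing acc with
  | nil => rfl
  | cons c cs ih =>
    by_cases hc : c ≠ ' ' ∧ c ≠ ','
    · have hb : (!(c == ' ' || c == ',')) = true := by simp [hc.1, hc.2]
      unfold pvScanC
      simp only [List.takeWhile_cons, hb, if_true]
      rw [if_pos hc]
      cases hv : PySem.Int.ofChars? [c] with
      | none => simp [List.foldl_cons, hv, pvStep_none]
      | some v => simp [List.foldl_cons, hv, ih]
    · have hb : (!(c == ' ' || c == ',')) = false := by
        rcases not_and_or.mp hc with h | h <;> simp at h <;> simp [h]
      unfold pvScanC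
      simp only [List.takeWhile_cons, hb]
      rw [if_neg hc]
      rfl

lemma pvTake_eq_takeWhile (p : Char → Bool) (l : List Char) (m : Nat) (hm : m ≤ l.length)
    (h1 : ∀ k, (hk : k < m) → p (l[k]'(by omega)) = true)
    (h2 : ∀ (h : m < l.length), p (l[m]'h) = false) :
    l.take m = l.takeWhile p := by
  induction l generalizing m with
  | nil => simp
  | cons c cs ih =>
    cases m with
    | zero =>
      have := h2 (by simp)
      simp at this
      rw [List.take_zero]
      simp only [List.takeWhile_cons, this, Bool.false_eq_true, if_false]
    | succ m' =>
      have hpc : p c = true := h1 0 (by omega)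
      rw [List.take_succ_cons, List.takeWhile_cons_of_pos hpc]
      congr 1
      exact ih m' (by simpa using hm) (fun k hk => h1 (k+1) (by omega)) (fun h => h2 (by simpa using h))

lemma pvSingle_prefix_iff (a : Char) (l : List Char) : [a] <+: l ↔ l.head? = some a := by
  constructor
  · rintro ⟨t, rfl⟩; rfl
  · intro h
    cases l with
    | nil => simp at h
    | cons b bs => simp at h; exact ⟨bs, by simp [h]⟩

-- characterisation of seg.find(d) for a single character d
lemma pvFind_neg (seg : List Char) (d : Char) (h : PySem.Chars.find seg [d] = -1) : d ∉ seg := by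
  have := (PySem.Chars.find_eq_neg_one_iff (s := seg) (sub := [d])).mp h
  simpa [List.singleton_infix_iff] using this

lemma pvFind_pos (seg : List Char) (d : Char) (h : PySem.Chars.find seg [d] ≠ -1) :
    0 ≤ PySem.Chars.find seg [d] ∧ (PySem.Chars.find seg [d]).toNat < seg.length ∧
    seg[(PySem.Chars.find seg [d]).toNat]? = some d ∧
    ∀ k < (PySem.Chars.find seg [d]).toNat, seg[k]? ≠ some d := by
  have h0 : 0 ≤ PySem.Chars.find seg [d] := by
    have := PySem.Chars.neg_one_le_find (s := seg) (sub := [d])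
    omega
  obtain ⟨hpre, hmin⟩ := PySem.Chars.find_spec (s := seg) (sub := [d]) h0
  have hat : seg[(PySem.Chars.find seg [d]).toNat]? = some d := by
    have := (pvSingle_prefix_iff d _).mp hpre
    rwa [List.head?_drop] at this
  refine ⟨h0, ?_, hat, ?_⟩
  · by_contra hlen
    rw [List.getElem?_eq_none_iff.mpr (by omega)] at hat
    simp at hat
  · intro k hk hcontra
    exact hmin k hk ((pvSingle_prefix_iff d _).mpr (by rwa [List.head?_drop]))

-- B's cut (earliest of find(' ') / find(',')) isolates exactly the takeWhile token
lemma pvCutTake (seg : List Char) :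
    PySem.List.slice seg none
      (some (if PySem.Chars.find seg [','] ≠ -1 then
               min (if PySem.Chars.find seg [' '] ≠ -1 then PySem.Chars.find seg [' '] else (seg.length : Int))
                   (PySem.Chars.find seg [','])
             else (if PySem.Chars.find seg [' '] ≠ -1 then PySem.Chars.find seg [' '] else (seg.length : Int)))) =
    seg.takeWhile (fun c => !(c == ' ' || c == ',')) := by
  set i := PySem.Chars.find seg [' '] with hi
  set j := PySem.Chars.find seg [','] with hj
  set cut1 : Int := if i ≠ -1 then i else (seg.length : Int) with hcut1
  set cut : Int := if j ≠ -1 then min cut1 j else cut1 with hcut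
  have hilen : i ≠ -1 → 0 ≤ i ∧ i.toNat < seg.length := fun h => ⟨(pvFind_pos seg ' ' h).1, (pvFind_pos seg ' ' h).2.1⟩
  have hjlen : j ≠ -1 → 0 ≤ j ∧ j.toNat < seg.length := fun h => ⟨(pvFind_pos seg ',' h).1, (pvFind_pos seg ',' h).2.1⟩
  have h0 : 0 ≤ cut ∧ cut ≤ (seg.length : Int) := by
    rcases eq_or_ne i (-1) with h | h <;> rcases eq_or_ne j (-1) with h' | h' <;>
        simp only [hcut, hcut1, h, h', ne_eq, not_true_eq_false, not_false_eq_true, if_true, if_false, le_min_iff, min_le_iff]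
    · omega
    · have := hjlen h'; omega
    · have := hilen h; omega
    · have := hilen h; have := hjlen h'; omega
  have hcle1 : cut ≤ cut1 := by
    rcases eq_or_ne j (-1) with h' | h' <;> simp [hcut, h']
  have hclej : j ≠ -1 → cut ≤ j := by
    intro h'; simp [hcut, h']
  have h_sp : ∀ k, k < cut.toNat → seg[k]? ≠ some ' ' := by
    intro k hk hceq
    rcases eq_or_ne i (-1) with h | h
    · have hklen : k < seg.length := by
        by_contra hh
        rw [List.getElem?_eq_none_iff.mpr (by omega)] at hceq
        simp at hceq
      have : (' ' : Char) ∈ seg := by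
        have := List.getElem?_eq_getElem hklen
        rw [this] at hceq
        simp only [Option.some.injEq] at hceq
        exact hceq ▸ List.getElem_mem _
      exact pvFind_neg seg ' ' h this
    · have hc1i : cut1 = i := by simp [hcut1, h]
      have h0i := (hilen h).1
      exact (pvFind_pos seg ' ' h).2.2.2 k (by omega) hceq
  have h_cm : ∀ k, k < cut.toNat → seg[k]? ≠ some ',' := by
    intro k hk hceq
    rcases eq_or_ne j (-1) with h | h
    · have hklen : k < seg.length := by
        by_contra hh
        rw [List.getElem?_eq_none_iff.mpr (by omega)] at hceq
        simp at hceq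
      have : (',' : Char) ∈ seg := by
        have := List.getElem?_eq_getElem hklen
        rw [this] at hceq
        simp only [Option.some.injEq] at hceq
        exact hceq ▸ List.getElem_mem _
      exact pvFind_neg seg ',' h this
    · have h0j := (hjlen h).1
      have := hclej h
      exact (pvFind_pos seg ',' h).2.2.2 k (by omega) hceq
  have h_at : cut.toNat < seg.length → seg[cut.toNat]? = some ' ' ∨ seg[cut.toNat]? = some ',' := by
    intro hlt
    rcases eq_or_ne j (-1) with h' | h'
    · have hcc : cut = cut1 := by simp [hcut, h']
      rcases eq_or_ne i (-1) with h | h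
      · have : cut1 = (seg.length : Int) := by simp [hcut1, h]
        omega
      · have hc1i : cut1 = i := by simp [hcut1, h]
        left
        have := (pvFind_pos seg ' ' h).2.2.1
        rwa [show cut.toNat = i.toNat by omega]
    · rcases eq_or_ne i (-1) with h | h
      · have hcc : cut = min cut1 j := by simp [hcut, h']
        have hc1 : cut1 = (seg.length : Int) := by simp [hcut1, h]
        have h0j := (hjlen h').1
        have hjl := (hjlen h').2
        have : cut = j := by omega
        right
        have := (pvFind_pos seg ',' h').2.2.1
        rwa [show cut.toNat = j.toNat by omega]
      · have hcc : cut = min cut1 j := by simp [hcut, h']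
        have hc1i : cut1 = i := by simp [hcut1, h]
        have h0i := (hilen h).1
        have h0j := (hjlen h').1
        rcases le_or_gt i j with hij | hij
        · have : cut = i := by omega
          left
          have := (pvFind_pos seg ' ' h).2.2.1
          rwa [show cut.toNat = i.toNat by omega]
        · have : cut = j := by omega
          right
          have := (pvFind_pos seg ',' h').2.2.1
          rwa [show cut.toNat = j.toNat by omega]
  have hmn : cut = ((cut.toNat : Nat) : Int) := (Int.toNat_of_nonneg h0.1).symm
  rw [hmn, PySem.List.slice_to_natCast]
  refine pvTake_eq_takeWhile _ _ _ (by omega) ?_ ?_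
  · intro k hk
    have hklen : k < seg.length := by omega
    have hs := h_sp k hk
    have hc := h_cm k hk
    rw [List.getElem?_eq_getElem hklen] at hs hc
    simp only [ne_eq, Option.some.injEq] at hs hc
    simp [hs, hc]
  · intro h
    rcases h_at h with hx | hx <;> rw [List.getElem?_eq_getElem h] at hx <;>
      simp only [Option.some.injEq] at hx <;> simp [hx]

-- per operand: A's scan-and-break loop equals B's token-isolating operand
lemma pvOperand_eq (s : List Char) (off : Int) (hoff : 0 ≤ off) :
    pvScanA s (PySem.List.pyRange off (s.length : Int) 1) 0 = pvOperand s off := by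
  have hoffn : off = ((off.toNat : Nat) : Int) := (Int.toNat_of_nonneg hoff).symm
  unfold pvOperand
  rw [hoffn, PySem.List.slice_from_natCast]
  simp only
  rw [pvScanA_eq_pvScanC, pvScanC_eq_fold, ← pvCutTake (List.drop off.toNat s)]

-- ===== VERDICT (by name: the statement is the Claim_ definition above) =====
theorem DIFFRNT_spec : Claim_equal_DIFFRNT := by
  intro code index _ hpre
  unfold Spec_DIFFRNT DIFFRNT DIFFRNT_alt
  cases hline : PySem.List.pyGet? code index with
  | none =>
    exfalso
    unfold Pre_DIFFRNT pvPreB at hpre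
    rw [hline] at hpre
    simp at hpre
  | some line =>
    have h1 : (0 : Int) ≤ PySem.Chars.find line.toList ("DIFFRINT ".toList) + 9 := by
      have := PySem.Chars.neg_one_le_find (s := line.toList) (sub := "DIFFRINT ".toList)
      omega
    have h2 : (0 : Int) ≤ PySem.Chars.find line.toList ("AN ".toList) + 3 := by
      have := PySem.Chars.neg_one_le_find (s := line.toList) (sub := "AN ".toList)
      omega
    simp only [Option.elim]
    rw [pvOperand_eq _ _ h1, pvOperand_eq _ _ h2]
    cases pvOperand line.toList (PySem.Chars.find line.toList ("DIFFRINT ".toList) + 9) with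
    | none => rfl
    | some v1 =>
      cases pvOperand line.toList (PySem.Chars.find line.toList ("AN ".toList) + 3) with
      | none => rfl
      | some v2 =>
        by_cases hv : v1 = v2 <;> simp [hv]
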